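-- pv_equiv track=rewrite | github.com/sivasubramanics/wpscripts | wp1_filter_isoforms.py | parse_uniref_desc
-- ===== SOURCE A (Python) =====
-- def parse_uniref_desc(desc):
--     """
--     Parse the uniref description "titin isoform X1 n=7 Tax=Crotalus tigris TaxID=88082 RepID=UPI00192FAB0"
--     return
--     desc = titin isoform X1
--     n= 7
--     Tax = Crotalus tigris
--     TaxID = 88082
--     RepID = UPI00192FAB0
--     """
--     parts = desc.split()
--     parsed_data = {}
--
--     desc_parts = []
--     for part in parts:
--         if part.startswith("n="):
--             break
--         desc_parts.append(part)
--     parsed_data['desc'] = ' '.join(desc_parts)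
--     # Iterate over the remaining parts and parse them
--     for part in parts[len(desc_parts):]:
--         if '=' not in part:
--             # merge the last part with the current part
--             parsed_data[list(parsed_data.keys())[-1]] += ' ' + part
--             continue
--         key, value = part.split('=')
--         parsed_data[key] = value
--     return parsed_data
-- ===== SOURCE B (Python) =====
-- def parse_uniref_desc(desc):
--     parts = desc.split()
--     idx = next((i for i, p in enumerate(parts) if p.startswith("n=")), len(parts))
--     # group the tail: a new group starts at each '='-containing token
--     groups = []
--     for part in parts[idx:]:
--         if '=' in part:
--             groups.append([part])
--         else:
--             groups[-1].append(part)
--     result = {'desc': ' '.join(parts[:idx])}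
--     for g in groups:
--         key, value = g[0].split('=')
--         result[key] = ' '.join([value] + g[1:])
--     return result
-- ===== Notes on version B (the rewrite author's own statement) =====
-- stated objective: alternative
-- what changed: B splits the tail into groups (each '='-token opens a group, bare words join it) and builds the dict in one insert per group, instead of A's walk that mutates the last-inserted dict key word by word.
-- outside the precondition, e.g. on parse_uniref_desc('a n=1 desc=x y'): A returns {'desc': 'x', 'n': '1 y'}, B returns {'desc': 'x y', 'n': '1'}; on parse_uniref_desc('n=a=b'): A raises ValueError, B raises ValueError
import Mathlib
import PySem

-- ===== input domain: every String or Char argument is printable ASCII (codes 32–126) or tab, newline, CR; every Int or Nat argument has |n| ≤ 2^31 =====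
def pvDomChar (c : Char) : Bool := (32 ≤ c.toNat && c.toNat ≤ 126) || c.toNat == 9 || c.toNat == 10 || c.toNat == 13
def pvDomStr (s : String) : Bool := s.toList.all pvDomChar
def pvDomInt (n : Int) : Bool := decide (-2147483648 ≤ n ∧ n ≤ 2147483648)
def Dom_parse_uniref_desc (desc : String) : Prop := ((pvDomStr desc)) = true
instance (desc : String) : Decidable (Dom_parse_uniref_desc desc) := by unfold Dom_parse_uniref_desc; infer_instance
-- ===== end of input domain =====

-- B parses the tail by grouping tokens (each '='-token starts a group, bare words join it) instead
-- of A's mutate-last-dict-key walk; objective: alternative decomposition, same O(n) cost.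


-- ===== PORT A =====
-- first loop of A: collect tokens until one starts with "n=" (the 'break')
def pvADescParts : List String → List String
  | [] => []
  | p :: ps => if PySem.Str.startswith p "n=" then [] else p :: pvADescParts ps

-- body of A's second loop
def pvAStep (d : PySem.Dict String String) (part : String) : PySem.Dict String String :=
  if PySem.Str.isIn "=" part = false then
    -- parsed_data[list(parsed_data.keys())[-1]] += ' ' + part  (keys never empty: 'desc' is present)
    d.modify (PySem.List.pyGetD d.keys (-1) "") "" (fun v => v ++ " " ++ part)
  else
    match (PySem.Str.split? part "=").getD [] with
    | [key, value] => d.insert key value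
    | _ => d   -- Python raises ValueError (split not of size 2); excluded by Pre_

def parse_uniref_desc (desc : String) : List (String × String) :=
  let parts := PySem.Str.split₀ desc
  let desc_parts := pvADescParts parts
  let d0 := (PySem.Dict.empty).insert "desc" (PySem.Str.join " " desc_parts)
  ((parts.drop desc_parts.length).foldl pvAStep d0).items

-- ===== PORT B =====
-- grouping step: an '='-token opens a new group, a bare word joins the last group
def pvBGroupStep (gs : List (List String)) (part : String) : List (List String) :=
  if PySem.Str.isIn "=" part then gs ++ [[part]]
  else gs.dropLast ++ [gs.getLastD [] ++ [part]]
  -- gs is never empty here: the first tail token starts with "n=", so it opens a group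

-- build one dict entry from a group
def pvBInsStep (d : PySem.Dict String String) (g : List String) : PySem.Dict String String :=
  match g with
  | [] => d   -- unreachable: every group is created nonempty
  | h :: rest =>
    match (PySem.Str.split? h "=").getD [] with
    | [key, value] => d.insert key (PySem.Str.join " " ([value] ++ rest))
    | _ => d   -- Python raises ValueError; excluded by Pre_

def parse_uniref_desc_alt (desc : String) : List (String × String) :=
  let parts := PySem.Str.split₀ desc
  let idx := parts.findIdx (fun p => PySem.Str.startswith p "n=")
  let groups := (parts.drop idx).foldl pvBGroupStep []
  let d0 := (PySem.Dict.empty).insert "desc" (PySem.Str.join " " (parts.take idx))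
  (groups.foldl pvBInsStep d0).items

-- ===== PRECONDITION & SPEC =====
-- the tokens from the first "n=" token on (A's second loop, B's grouped tail)
def pvTail (desc : String) : List String :=
  (PySem.Str.split₀ desc).dropWhile (fun p => !PySem.Str.startswith p "n=")

def pvKV (t : String) : List String := (PySem.Str.split? t "=").getD []

def pvKey (t : String) : String := (pvKV t).headD ""

-- Pre_ excludes tails with a token holding more than one '=' (A raises ValueError there), and —
-- only when the tail also has a bare '='-less word — tails with duplicate keys or the key 'desc',
-- where A's append-to-last-inserted-key target is an accident of dict insertion order.
def Pre_parse_uniref_desc (desc : String) : Prop :=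
  (∀ t ∈ pvTail desc, PySem.Str.isIn "=" t = true → (pvKV t).length = 2) ∧
  ((¬ ∀ t ∈ pvTail desc, PySem.Str.isIn "=" t = true) →
    (((pvTail desc).filter (fun t => PySem.Str.isIn "=" t)).map pvKey).Nodup ∧
    ∀ t ∈ pvTail desc, PySem.Str.isIn "=" t = true → pvKey t ≠ "desc")
instance (desc : String) : Decidable (Pre_parse_uniref_desc desc) := by
  unfold Pre_parse_uniref_desc; infer_instance

def pvWitness_parse_uniref_desc : String :=
  "titin isoform X1 n=7 Tax=Crotalus tigris TaxID=88082"

def Spec_parse_uniref_desc (desc : String) (out : List (String × String)) : Prop :=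
  out = parse_uniref_desc_alt desc
instance (desc : String) (out : List (String × String)) : Decidable (Spec_parse_uniref_desc desc out) := by
  unfold Spec_parse_uniref_desc; infer_instance

-- ===== CLAIM (what is proved, stated in full; the proofs are below) =====
def Claim_equal_parse_uniref_desc : Prop :=
  ∀ (desc : String), Dom_parse_uniref_desc desc → Pre_parse_uniref_desc desc →
    Spec_parse_uniref_desc desc (parse_uniref_desc desc)

-- ===== LEMMAS AND PROOFS =====

-- the recursive grouping both loops realize: an '='-token, then its run of bare words
def pvGroups : List String → List (List String)
  | [] => []
  | h :: rest =>
      (h :: rest.takeWhile (fun t => !PySem.Str.isIn "=" t)) ::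
      pvGroups (rest.dropWhile (fun t => !PySem.Str.isIn "=" t))
  termination_by ts => ts.length
  decreasing_by
    have := List.length_dropWhile_le (fun t => !PySem.Str.isIn "=" t) rest
    simp only [List.length_cons]
    omega

theorem pvADescParts_eq (parts : List String) :
    pvADescParts parts = parts.takeWhile (fun p => !PySem.Str.startswith p "n=") := by
  induction parts with
  | nil => rfl
  | cons h t ih =>
    by_cases hq : PySem.Str.startswith h "n=" <;>
      simp only [pvADescParts, hq, ih, List.takeWhile_cons, if_true, if_false, Bool.not_true,
        Bool.not_false, Bool.false_eq_true]

theorem pvTakeWhile_eq_take_findIdx (q : String → Bool) (l : List String) :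
    l.takeWhile (fun p => !q p) = l.take (l.findIdx q) := by
  induction l with
  | nil => simp
  | cons h t ih => by_cases hq : q h <;> simp [List.findIdx_cons, hq, ih]

theorem pvDropWhile_eq_drop_findIdx (q : String → Bool) (l : List String) :
    l.dropWhile (fun p => !q p) = l.drop (l.findIdx q) := by
  induction l with
  | nil => simp
  | cons h t ih => by_cases hq : q h <;> simp [List.findIdx_cons, hq, ih]

theorem pvDrop_len_takeWhile (p : String → Bool) (l : List String) :
    l.drop (l.takeWhile p).length = l.dropWhile p := by
  induction l with
  | nil => simp
  | cons h t ih => by_cases hp : p h <;> simp [hp, ih]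

theorem pvStartswith_isIn (p : String) (h : PySem.Str.startswith p "n=" = true) :
    PySem.Str.isIn "=" p = true := by
  rw [PySem.Str.isIn, PySem.Chars.isIn_iff_infix]
  have := (PySem.Chars.startswith_iff p.toList "n=".toList).mp (by simpa using h)
  obtain ⟨t, ht⟩ := this
  exact ⟨['n'], t, by simpa using ht⟩

theorem hdDropWhile (p : String → Bool) (l : List String) :
    ∀ x, (l.dropWhile p).head? = some x → p x = false := by
  induction l with
  | nil => simp
  | cons h t ih =>
    intro x hx
    by_cases hp : p h
    · exact ih x (by simpa [List.dropWhile_cons, hp] using hx)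
    · rw [List.dropWhile_cons, if_neg hp] at hx
      simp at hx
      simpa [← hx] using Bool.of_not_eq_true hp

-- ' '.join versus A's string concatenations
theorem pvJoin_shift (a w : String) (ws : List String) :
    PySem.Str.join " " (a :: w :: ws) = PySem.Str.join " " ((a ++ " " ++ w) :: ws) := by
  apply String.toList_inj.mp
  cases ws with
  | nil => simp [PySem.Str.toList_join, PySem.Chars.join_cons_cons, PySem.Chars.join_singleton]
  | cons u t =>
    simp only [PySem.Str.toList_join, List.map_cons, PySem.Chars.join_cons_cons,
      String.toList_append]
    simp

theorem pvJoin_singleton (a : String) : PySem.Str.join " " [a] = a := by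
  apply String.toList_inj.mp
  simp [PySem.Str.toList_join, PySem.Chars.join_singleton]

-- A's run of bare words appends, word by word, to the freshly inserted key
theorem pvAStep_ws (ws : List String) (hws : ∀ w ∈ ws, PySem.Str.isIn "=" w = false) :
    ∀ (d : PySem.Dict String String) (k a : String), d.contains k = false →
    ws.foldl pvAStep (d.insert k a) = d.insert k (PySem.Str.join " " (a :: ws)) := by
  induction ws with
  | nil => intro d k a _; simp [pvJoin_singleton]
  | cons w ws ih =>
    intro d k a hk
    have hw : PySem.Str.isIn "=" w = false := hws w (by simp)
    have hstep : pvAStep (d.insert k a) w = d.insert k (a ++ " " ++ w) := by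
      rw [pvAStep, if_pos hw]
      rw [PySem.Dict.keys_insert_of_not_contains d a hk,
        PySem.List.pyGetD_neg_one_append_singleton]
      rw [PySem.Dict.modify, PySem.Dict.getD_insert_self, PySem.Dict.insert_insert_self]
    rw [List.foldl_cons, hstep, ih (fun x hx => hws x (by simp [hx])) d k _ hk, pvJoin_shift]

-- B's foldl grouping closes the open last group over a run of bare words
theorem pvBGroup_ws (ws : List String) (hws : ∀ w ∈ ws, PySem.Str.isIn "=" w = false) :
    ∀ (gs : List (List String)) (g : List String),
    ws.foldl pvBGroupStep (gs ++ [g]) = gs ++ [g ++ ws] := by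
  induction ws with
  | nil => intro gs g; simp
  | cons w ws ih =>
    intro gs g
    have hw : PySem.Str.isIn "=" w = false := hws w (by simp)
    rw [List.foldl_cons]
    have hstep : pvBGroupStep (gs ++ [g]) w = gs ++ [g ++ [w]] := by
      rw [pvBGroupStep, if_neg (by simp only [hw, Bool.false_eq_true, not_false_eq_true]),
        List.dropLast_concat, List.getLastD_concat]
    rw [hstep, ih (fun x hx => hws x (by simp [hx]))]
    simp

-- B's foldl grouping is pvGroups
theorem pvBGroup_main : ∀ (n : Nat) (ts : List String), ts.length ≤ n →
    (∀ h, ts.head? = some h → PySem.Str.isIn "=" h = true) →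
    ∀ gs, ts.foldl pvBGroupStep gs = gs ++ pvGroups ts := by
  intro n
  induction n with
  | zero =>
    intro ts hlen _ gs
    cases ts with
    | nil => simp [pvGroups]
    | cons h t => simp at hlen
  | succ n ih =>
    intro ts hlen hhead gs
    match ts with
    | [] => simp [pvGroups]
    | h :: rest =>
      have hh : PySem.Str.isIn "=" h = true := hhead h rfl
      rw [List.foldl_cons]
      have hstep : pvBGroupStep gs h = gs ++ [[h]] := by rw [pvBGroupStep, if_pos hh]
      rw [hstep]
      have hsplit : rest = rest.takeWhile (fun t => !PySem.Str.isIn "=" t) ++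
          rest.dropWhile (fun t => !PySem.Str.isIn "=" t) :=
        (List.takeWhile_append_dropWhile).symm
      conv_lhs => rw [hsplit]
      rw [List.foldl_append]
      rw [pvBGroup_ws _ (fun w hw => by
        have := List.mem_takeWhile_imp hw
        simpa using this) gs [h]]
      rw [ih _ (by
          have := List.length_dropWhile_le (fun t => !PySem.Str.isIn "=" t) rest
          simp at hlen; omega)
        (fun x hx => by
          have := hdDropWhile (fun t => !PySem.Str.isIn "=" t) rest x hx
          simpa using this)]
      rw [pvGroups]
      simp

-- A's walk equals the insert-per-group fold, given fresh distinct keys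
theorem pvA_main : ∀ (n : Nat) (ts : List String), ts.length ≤ n →
    (∀ h, ts.head? = some h → PySem.Str.isIn "=" h = true) →
    (∀ t ∈ ts, PySem.Str.isIn "=" t = true → (pvKV t).length = 2) →
    (((ts.filter (fun t => PySem.Str.isIn "=" t)).map pvKey).Nodup) →
    ∀ (d : PySem.Dict String String),
    (∀ t ∈ ts, PySem.Str.isIn "=" t = true → d.contains (pvKey t) = false) →
    ts.foldl pvAStep d = (pvGroups ts).foldl pvBInsStep d := by
  intro n
  induction n with
  | zero =>
    intro ts hlen _ _ _ d _
    cases ts with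
    | nil => simp [pvGroups]
    | cons h t => simp at hlen
  | succ n ih =>
    intro ts hlen hhead harity hnd d hfresh
    match ts with
    | [] => simp [pvGroups]
    | h :: rest =>
      have hh : PySem.Str.isIn "=" h = true := hhead h rfl
      have hl := harity h (by simp) hh
      obtain ⟨k, v, hkv⟩ : ∃ k v, pvKV h = [k, v] := by
        rcases e : pvKV h with _ | ⟨x, _ | ⟨y, _ | _⟩⟩ <;> simp [e] at hl ⊢
      have hkey : pvKey h = k := by simp [pvKey, hkv]
      unfold pvKV at hkv
      set ws := rest.takeWhile (fun t => !PySem.Str.isIn "=" t) with hws_def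
      set rest' := rest.dropWhile (fun t => !PySem.Str.isIn "=" t) with hrest'_def
      have hws_bare : ∀ w ∈ ws, PySem.Str.isIn "=" w = false := by
        intro w hw
        have := List.mem_takeWhile_imp hw
        simpa using this
      have hstepA : pvAStep d h = d.insert k v := by
        rw [pvAStep, if_neg (by simp only [hh]; exact fun hc => by cases hc), hkv]
      have hfk : d.contains k = false := by
        have := hfresh h (by simp) hh; rwa [hkey] at this
      have hsplit : rest = ws ++ rest' := (List.takeWhile_append_dropWhile).symm
      have hfilter_ws : ws.filter (fun t => PySem.Str.isIn "=" t) = [] := by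
        rw [List.filter_eq_nil_iff]
        intro w hw
        simpa using hws_bare w hw
      have hrestsub : ∀ t ∈ rest', t ∈ h :: rest := by
        intro t ht
        exact List.mem_cons_of_mem _ ((List.dropWhile_sublist _).subset ht)
      have hnd' : ((rest'.filter (fun t => PySem.Str.isIn "=" t)).map pvKey).Nodup ∧
          k ∉ (rest'.filter (fun t => PySem.Str.isIn "=" t)).map pvKey := by
        rw [List.filter_cons_of_pos hh] at hnd
        conv at hnd => rw [hsplit]
        rw [List.filter_append, hfilter_ws, List.nil_append, List.map_cons, List.nodup_cons,
          hkey] at hnd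
        exact ⟨hnd.2, hnd.1⟩
      rw [List.foldl_cons, hstepA]
      conv_lhs => rw [hsplit, List.foldl_append]
      rw [pvAStep_ws ws hws_bare d k v hfk]
      rw [pvGroups]
      rw [List.foldl_cons]
      have hstepB : pvBInsStep d (h :: ws) = d.insert k (PySem.Str.join " " (v :: ws)) := by
        rw [pvBInsStep, hkv]
        simp
      rw [← hws_def, ← hrest'_def, hstepB]
      apply ih rest'
      · have hle : rest'.length ≤ rest.length := by
          rw [hrest'_def]; exact List.length_dropWhile_le _ rest
        simp only [List.length_cons] at hlen
        omega
      · intro x hx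
        have := hdDropWhile _ rest x hx
        simpa using this
      · intro t ht h2
        exact harity t (hrestsub t ht) h2
      · exact hnd'.1
      · intro t ht h2
        rw [PySem.Dict.contains_insert]
        have h3 : pvKey t ∈ (rest'.filter (fun t => PySem.Str.isIn "=" t)).map pvKey :=
          List.mem_map_of_mem (List.mem_filter.mpr ⟨ht, h2⟩)
        have hne : pvKey t ≠ k := fun he => hnd'.2 (he ▸ h3)
        have h4 := hfresh t (hrestsub t ht) h2
        simp [hne, h4]

-- with no bare word in the tail, every group is a singleton and freshness is not needed
theorem pvA_main_simple (ts : List String)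
    (hall : ∀ t ∈ ts, PySem.Str.isIn "=" t = true)
    (harity : ∀ t ∈ ts, PySem.Str.isIn "=" t = true → (pvKV t).length = 2) :
    ∀ (d : PySem.Dict String String),
    ts.foldl pvAStep d = (pvGroups ts).foldl pvBInsStep d := by
  induction ts with
  | nil => intro d; simp [pvGroups]
  | cons h rest ih =>
    intro d
    have hh : PySem.Str.isIn "=" h = true := hall h (by simp)
    have hl := harity h (by simp) hh
    obtain ⟨k, v, hkv⟩ : ∃ k v, pvKV h = [k, v] := by
      rcases e : pvKV h with _ | ⟨x, _ | ⟨y, _ | _⟩⟩ <;> simp [e] at hl ⊢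
    unfold pvKV at hkv
    have hws : rest.takeWhile (fun t => !PySem.Str.isIn "=" t) = [] := by
      cases rest with
      | nil => simp
      | cons x t =>
        rw [List.takeWhile_cons, if_neg (by simpa using hall x (by simp))]
    have hrest' : rest.dropWhile (fun t => !PySem.Str.isIn "=" t) = rest := by
      cases rest with
      | nil => simp
      | cons x t =>
        rw [List.dropWhile_cons, if_neg (by simpa using hall x (by simp))]
    rw [pvGroups, hws, hrest', List.foldl_cons, List.foldl_cons]
    have hstepA : pvAStep d h = d.insert k v := by
      rw [pvAStep, if_neg (by simp only [hh]; exact fun hc => by cases hc), hkv]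
    have hstepB : pvBInsStep d [h] = d.insert k v := by
      rw [pvBInsStep, hkv]
      simp [pvJoin_singleton]
    rw [hstepA, hstepB]
    exact ih (fun t ht => hall t (by simp [ht])) (fun t ht h2 => harity t (by simp [ht]) h2) _

-- ===== VERDICT (by name: the statement is the Claim_ definition above) =====
theorem parse_uniref_desc_spec : Claim_equal_parse_uniref_desc := by
  unfold Claim_equal_parse_uniref_desc
  intro desc _ hpre
  unfold Spec_parse_uniref_desc parse_uniref_desc parse_uniref_desc_alt
  set q : String → Bool := fun p => PySem.Str.startswith p "n=" with hq_def
  set parts := PySem.Str.split₀ desc with hparts_def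
  have htw : pvADescParts parts = parts.takeWhile (fun p => !q p) := pvADescParts_eq parts
  have htail_eq : pvTail desc = parts.dropWhile (fun p => !q p) := rfl
  have hAdrop : parts.drop (pvADescParts parts).length = pvTail desc := by
    rw [htw, htail_eq, pvDrop_len_takeWhile]
  have hBdrop : parts.drop (parts.findIdx q) = pvTail desc := by
    rw [htail_eq, pvDropWhile_eq_drop_findIdx]
  have hBtake : parts.take (parts.findIdx q) = pvADescParts parts := by
    rw [htw, pvTakeWhile_eq_take_findIdx]
  have hhead : ∀ h, (pvTail desc).head? = some h → PySem.Str.isIn "=" h = true := by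
    intro h hx
    have := hdDropWhile (fun p => !q p) parts h (htail_eq ▸ hx)
    exact pvStartswith_isIn h (by simpa using this)
  simp only [hAdrop, hBdrop, hBtake]
  set d0 := (PySem.Dict.empty : PySem.Dict String String).insert "desc"
    (PySem.Str.join " " (pvADescParts parts)) with hd0_def
  rw [pvBGroup_main (pvTail desc).length (pvTail desc) le_rfl hhead []]
  rw [List.nil_append]
  congr 1
  by_cases hall : ∀ t ∈ pvTail desc, PySem.Str.isIn "=" t = true
  · exact pvA_main_simple (pvTail desc) hall hpre.1 d0
  · obtain ⟨hnd, hndesc⟩ := hpre.2 hall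
    apply pvA_main (pvTail desc).length (pvTail desc) le_rfl hhead hpre.1 hnd d0
    intro t ht h2
    have hkeys : d0.keys = ["desc"] := by
      rw [hd0_def, PySem.Dict.keys_insert_of_not_contains _ _ (PySem.Dict.contains_empty _),
        PySem.Dict.keys_empty, List.nil_append]
    rw [← Bool.not_eq_true, PySem.Dict.contains_iff_mem_keys, hkeys]
    simp [hndesc t ht h2]
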